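-- pv_equiv track=rewrite | github.com/MichaelMladenow/Algorithms | sudoku/sudoku.py | get_quadrant_options
-- ===== SOURCE A (Python) =====
-- qwidth  = 3                   # Quadrant Width
--
-- qheight = 3                   # Quadrant Height
--
-- nums    = list(range(1, 10))  # Possible Numbers
--
-- def get_quadrant(matrix, row, col):
--     """Get a submatrix of the cells quadrant.
--
--     Retrieves a 3x3 submatrix, containing all cells in
--     a cell's quadrant.
--
--     Args:
--         int row: Index of the target cell's row.
--         int col: Index of the target cell's col.
--
--     Returns:
--         list<int>: 3x3 matrix, containing all cells in
--         the quadrant.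
--     """
--     col_start = qheight * (col // qheight)
--     col_end   = col_start + qheight
--     row_start = qwidth * (row // qwidth)
--     row_end   = row_start + qwidth
--     return [row[col_start:col_end] for row in
--             matrix[row_start:row_end]]
--
-- def get_quadrant_options(matrix, row, col):
--     """Retrieves a 3x3 submatrix, containing the valid sudoku
--     numbers in a cell's quadrant as per the rule that numbers
--     in a quadrant must not repeat.
--
--     Args:
--         int row: Index of the target cell's row.
--         int col: Index of the target cell's col.
--
--     Returns:
--         list<int>: 3x3 matrix, containing the valid numbers in a
--         a cell's quadrant.
--     """
--     numbers    = nums[:]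
--     sub_matrix = get_quadrant(matrix, row, col)
--     for row in sub_matrix:
--         for item in row:
--             if item in numbers:
--                 numbers.pop(numbers.index(item))
--     return numbers
-- ===== SOURCE B (Python) =====
-- qwidth  = 3
-- qheight = 3
-- nums    = list(range(1, 10))
--
-- def get_quadrant(matrix, row, col):
--     col_start = qheight * (col // qheight)
--     col_end   = col_start + qheight
--     row_start = qwidth * (row // qwidth)
--     row_end   = row_start + qwidth
--     return [row[col_start:col_end] for row in
--             matrix[row_start:row_end]]
--
-- def get_quadrant_options(matrix, row, col):
--     present = {item for r in get_quadrant(matrix, row, col) for item in r}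
--     return [n for n in nums if n not in present]
-- ===== Notes on version B (the rewrite author's own statement) =====
-- stated objective: simpler
-- what changed: B collects the set of values present in the quadrant once and filters the fixed candidate list 1..9 in a single pass, replacing A's in-place index/pop mutation of a copy of nums while iterating the quadrant cells.
import Mathlib
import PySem

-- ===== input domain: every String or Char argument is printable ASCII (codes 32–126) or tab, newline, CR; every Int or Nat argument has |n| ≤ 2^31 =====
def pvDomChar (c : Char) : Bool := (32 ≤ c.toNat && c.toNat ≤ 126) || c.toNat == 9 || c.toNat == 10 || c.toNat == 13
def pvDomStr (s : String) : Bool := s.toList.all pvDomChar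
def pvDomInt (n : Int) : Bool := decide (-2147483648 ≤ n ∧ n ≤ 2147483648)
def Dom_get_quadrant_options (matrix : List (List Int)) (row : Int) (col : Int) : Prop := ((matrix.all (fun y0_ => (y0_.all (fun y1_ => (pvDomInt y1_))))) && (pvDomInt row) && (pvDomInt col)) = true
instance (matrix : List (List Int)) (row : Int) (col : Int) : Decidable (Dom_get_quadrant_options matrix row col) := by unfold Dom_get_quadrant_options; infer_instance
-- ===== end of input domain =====

-- B builds the set of values present in the quadrant once and filters the fixed
-- candidate list in a single pass, instead of A's index/pop mutation of a copy of
-- nums while scanning the quadrant (objective: simpler).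

-- module constants
def pvNums : List Int := [1, 2, 3, 4, 5, 6, 7, 8, 9]

-- shared helper (identical in A and B, as in the Python sources)
def get_quadrant (matrix : List (List Int)) (row : Int) (col : Int) : List (List Int) :=
  let col_start := 3 * (PySem.Int.floordiv col 3)
  let col_end := col_start + 3
  let row_start := 3 * (PySem.Int.floordiv row 3)
  let row_end := row_start + 3
  (PySem.List.slice matrix (some row_start) (some row_end)).map
    (fun r => PySem.List.slice r (some col_start) (some col_end))

-- ===== PORT A =====
def get_quadrant_options (matrix : List (List Int)) (row : Int) (col : Int) : List Int :=
  let numbers := pvNums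
  let sub_matrix := get_quadrant matrix row col
  sub_matrix.foldl
    (fun numbers r =>
      r.foldl
        (fun numbers item =>
          if item ∈ numbers then
            match PySem.List.index? numbers item with
            | some i =>
              match PySem.List.pop? numbers (i : Int) with
              | some p => p.2
              | none => numbers
            | none => numbers
          else numbers)
        numbers)
    numbers

-- ===== PORT B =====
def get_quadrant_options_alt (matrix : List (List Int)) (row : Int) (col : Int) : List Int :=
  let present : PySem.Set Int :=
    PySem.Set.ofList ((get_quadrant matrix row col).flatMap (fun r => r))
  pvNums.filter (fun n => !(PySem.Set.contains present n))

-- ===== PRECONDITION & SPEC =====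
def Spec_get_quadrant_options (matrix : List (List Int)) (row : Int) (col : Int) (out : List Int) : Prop := out = get_quadrant_options_alt matrix row col
instance (matrix : List (List Int)) (row : Int) (col : Int) (out : List Int) : Decidable (Spec_get_quadrant_options matrix row col out) := by unfold Spec_get_quadrant_options; infer_instance

-- ===== CLAIM (what is proved, stated in full; the proofs are below) =====
def Claim_equal_get_quadrant_options : Prop := ∀ (matrix : List (List Int)) (row : Int) (col : Int), Dom_get_quadrant_options matrix row col → Spec_get_quadrant_options matrix row col (get_quadrant_options matrix row col)

-- ===== LEMMAS AND PROOFS =====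

theorem pv_eraseIdx_mid (pre suf : List Int) (x : Int) :
    (pre ++ x :: suf).eraseIdx pre.length = pre ++ suf := by
  induction pre with
  | nil => simp
  | cons a pre ih => simp [ih]

-- A's single removal step: on a duplicate-free list it is exactly a filter.
theorem pv_step_eq_filter (ns : List Int) (item : Int) (h : ns.Nodup) :
    (if item ∈ ns then
      match PySem.List.index? ns item with
      | some i =>
        match PySem.List.pop? ns (i : Int) with
        | some p => p.2
        | none => ns
      | none => ns
    else ns) = ns.filter (fun x => x != item) := by
  by_cases hmem : item ∈ ns
  · simp only [hmem, if_pos]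
    obtain ⟨i, hi⟩ := Option.isSome_iff_exists.mp
      ((PySem.List.index?_isSome_iff (xs := ns) (v := item)).mpr hmem)
    obtain ⟨pre, suf, hns, hlen, hpre⟩ := ((PySem.List.index?_eq_some_iff ns item i).mp hi)
    have hlt : i < ns.length := by subst hns; rw [← hlen]; simp
    rw [hi]
    show (match PySem.List.pop? ns ((i : Nat) : Int) with
          | some p => p.2
          | none => ns) = ns.filter (fun x => x != item)
    rw [PySem.List.pop?_natCast (h := hlt)]
    show ns.eraseIdx i = ns.filter (fun x => x != item)
    subst hns; subst hlen
    have hsuf : item ∉ suf := by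
      rcases List.nodup_append.mp h with ⟨_, hcs, _⟩
      exact (List.nodup_cons.mp hcs).1
    rw [pv_eraseIdx_mid, List.filter_append, List.filter_cons]
    have hpred : ∀ (l : List Int), item ∉ l → l.filter (fun x => x != item) = l := by
      intro l hl
      apply List.filter_eq_self.mpr
      intro x hx
      simp only [bne_iff_ne, ne_eq]
      rintro rfl; exact hl hx
    simp [hpred pre hpre, hpred suf hsuf]
  · simp only [hmem, if_neg, not_false_iff]
    symm
    apply List.filter_eq_self.mpr
    intro x hx
    simp only [bne_iff_ne, ne_eq]
    rintro rfl; exact hmem hx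

theorem pv_fold_eq_filter (items : List Int) (ns : List Int) (h : ns.Nodup) :
    items.foldl
      (fun numbers item =>
        if item ∈ numbers then
          match PySem.List.index? numbers item with
          | some i =>
            match PySem.List.pop? numbers (i : Int) with
            | some p => p.2
            | none => numbers
          | none => numbers
        else numbers)
      ns = ns.filter (fun x => !(items.contains x)) := by
  induction items generalizing ns with
  | nil => simp
  | cons x items ih =>
    simp only [List.foldl_cons]
    rw [pv_step_eq_filter ns x h, ih _ (h.filter _), List.filter_filter]
    apply List.filter_congr
    intro y _
    simp only [List.contains_cons, Bool.not_or, Bool.and_comm, bne]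

-- ===== VERDICT (by name: the statement is the Claim_ definition above) =====
theorem get_quadrant_options_spec : Claim_equal_get_quadrant_options := by
  intro matrix row col _
  unfold Spec_get_quadrant_options get_quadrant_options get_quadrant_options_alt
  rw [← List.foldl_flatten, pv_fold_eq_filter _ _ (by decide)]
  apply List.filter_congr
  intro y _
  simp [PySem.Set.contains, PySem.Set.mem_ofList]
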